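-- pv_equiv track=rewrite | github.com/hanjungwoo1/CodingTest | test.py | check_guard
-- ===== SOURCE A (Python) =====
-- def mark(graph, x, y, N, M, Direction):
--     if x < 0 or N <= x:
--         return graph
--
--     if y < 0 or M <= y:
--         return graph
--
--     if graph[x][y] in ['X', '<', '>', '^', 'v']:
--         return graph
--
--     graph[x][y] = 'o'
--
--     if Direction == "right":
--         mark(graph, x, y+1, N, M, "right")
--
--     if Direction == "left":
--         mark(graph, x, y-1, N, M, "left")
--
--     if Direction == "down":
--         mark(graph, x+1, y, N, M, "down")
--
--     if Direction == "up":
--         mark(graph, x-1, y, N, M, "up")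
--
--     return graph
--
-- def check_guard(graph, N, M):
--
--     start = [-1, -1]
--
--     for x in range(N):
--         for y in range(M):
--             if graph[x][y] == "A":
--                 start = [x, y]
--
--             if graph[x][y] == ">":
--                 graph[x][y] = 'o'
--                 graph = mark(graph, x, y+1, N, M, "right")
--
--             if graph[x][y] == "<":
--                 graph[x][y] = 'o'
--                 graph = mark(graph, x, y-1, N, M, "left")
--
--             if graph[x][y] == "v":
--                 graph[x][y] = 'o'
--                 graph = mark(graph, x+1, y, N, M, "down")
--
--             if graph[x][y] == "^":
--                 graph[x][y] = 'o'
--                 graph = mark(graph, x-1, y, N, M, "up")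
--
--     return start
-- ===== SOURCE B (Python) =====
-- # B: pure scan instead of in-place ray marking -- find the last 'A' (row-major)
-- # that no guard watches.  A rewrites watched cells to 'o' in place; B leaves
-- # graph untouched, so the equivalence is about the return value.
--
-- BLOCKERS = {'X', '<', '>', '^', 'v'}
--
-- def _watched(graph, x, y, N, M):
--     # is cell (x, y) in some guard's line of sight?
--     j = y - 1
--     while j >= 0 and graph[x][j] not in BLOCKERS:
--         j -= 1
--     if j >= 0 and graph[x][j] == '>':
--         return True
--     j = y + 1
--     while j < M and graph[x][j] not in BLOCKERS:
--         j += 1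
--     if j < M and graph[x][j] == '<':
--         return True
--     i = x - 1
--     while i >= 0 and graph[i][y] not in BLOCKERS:
--         i -= 1
--     if i >= 0 and graph[i][y] == 'v':
--         return True
--     i = x + 1
--     while i < N and graph[i][y] not in BLOCKERS:
--         i += 1
--     return i < N and graph[i][y] == '^'
--
-- def check_guard(graph, N, M):
--     start = [-1, -1]
--     for x in range(N):
--         for y in range(M):
--             if graph[x][y] == 'A' and not _watched(graph, x, y, N, M):
--                 start = [x, y]
--     return start
-- ===== Notes on version B (the rewrite author's own statement) =====
-- stated objective: alternative
-- what changed: B replaces A's in-place ray-marking simulation (recursive mark that paints watched cells 'o') by a pure scan that returns the last 'A' (row-major) not in any guard's line of sight, never mutating the grid (A mutates graph in place; the equivalence is about the return value).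
-- intended difference: On grids where the scan-last 'A' unwatched from the left ('>') or above ('v') is watched from the right ('<') or below ('^'), A still returns that position because its row-major scan lets right/below guards fire only after the 'A' was recorded, while B returns the last 'A' watched by no guard at all (or [-1,-1]), the intended unseen start position. — e.g. on check_guard([["A", "<"]], 1, 2): A returns [0, 0], B returns [-1, -1]
import Mathlib
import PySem

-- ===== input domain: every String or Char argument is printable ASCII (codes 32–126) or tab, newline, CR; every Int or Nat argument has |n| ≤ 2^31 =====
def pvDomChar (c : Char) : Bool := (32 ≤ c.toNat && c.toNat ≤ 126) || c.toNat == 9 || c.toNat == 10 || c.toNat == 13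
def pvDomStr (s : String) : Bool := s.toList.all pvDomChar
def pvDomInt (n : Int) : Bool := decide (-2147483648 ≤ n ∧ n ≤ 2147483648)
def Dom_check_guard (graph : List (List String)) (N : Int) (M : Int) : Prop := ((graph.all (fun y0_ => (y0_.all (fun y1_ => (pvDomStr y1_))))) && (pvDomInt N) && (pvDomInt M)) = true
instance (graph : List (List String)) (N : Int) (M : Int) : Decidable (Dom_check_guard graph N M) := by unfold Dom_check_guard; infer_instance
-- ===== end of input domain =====

-- B replaces A's in-place ray-marking simulation by a pure scan for the last 'A' no
-- guard watches; A mutates `graph` in place while B does not — the equivalence proved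
-- is about the return value.

-- ===== PORT A =====
def pvGuards : List String := ["X", "<", ">", "^", "v"]

def pvCell (g : List (List String)) (x y : Nat) : String := (g.getD x []).getD y ""

def pvSetCell (g : List (List String)) (x y : Nat) (v : String) : List (List String) :=
  g.set x ((g.getD x []).set y v)

-- literal port of A's recursive `mark`; the in-place mutation is threaded as the return
-- value, and a fuel argument (always ≥ the ray length at call sites) makes it total.
def markA : Nat → List (List String) → Int → Int → Int → Int → String → List (List String)
  | 0, g, _, _, _, _, _ => g
  | fuel+1, g, x, y, N, M, dir =>
    if x < 0 ∨ N ≤ x then g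
    else if y < 0 ∨ M ≤ y then g
    else if pvCell g x.toNat y.toNat ∈ pvGuards then g
    else
      let g1 := pvSetCell g x.toNat y.toNat "o"
      let g2 := if dir = "right" then markA fuel g1 x (y+1) N M "right" else g1
      let g3 := if dir = "left" then markA fuel g2 x (y-1) N M "left" else g2
      let g4 := if dir = "down" then markA fuel g3 (x+1) y N M "down" else g3
      if dir = "up" then markA fuel g4 (x-1) y N M "up" else g4

-- one body of A's inner loop (the four `if`s re-read graph[x][y] after each possible update)
def pvStepA (N M : Int) (st : List (List String) × List Int) (x y : Int) :
    List (List String) × List Int :=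
  let fuel := N.toNat + M.toNat + 1
  let start := if pvCell st.1 x.toNat y.toNat = "A" then [x, y] else st.2
  let g := st.1
  let g := if pvCell g x.toNat y.toNat = ">" then
      markA fuel (pvSetCell g x.toNat y.toNat "o") x (y+1) N M "right" else g
  let g := if pvCell g x.toNat y.toNat = "<" then
      markA fuel (pvSetCell g x.toNat y.toNat "o") x (y-1) N M "left" else g
  let g := if pvCell g x.toNat y.toNat = "v" then
      markA fuel (pvSetCell g x.toNat y.toNat "o") (x+1) y N M "down" else g
  let g := if pvCell g x.toNat y.toNat = "^" then
      markA fuel (pvSetCell g x.toNat y.toNat "o") (x-1) y N M "up" else g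
  (g, start)

def check_guard (graph : List (List String)) (N : Int) (M : Int) : List Int :=
  ((PySem.List.pyRange 0 N 1).foldl
    (fun st x => (PySem.List.pyRange 0 M 1).foldl (fun st y => pvStepA N M st x y) st)
    (graph, ([-1, -1] : List Int))).2

-- ===== PORT B =====
-- Source B: `while j >= 0 and f(j) not in BLOCKERS: j -= 1`, then the stop index (if any)
def pvScanNeg (f : Nat → String) : Nat → Option Nat
  | 0 => none
  | j+1 => if f j ∈ pvGuards then some j else pvScanNeg f j

-- Source B: `while j < bound and f(j) not in BLOCKERS: j += 1`, then the stop index (if any)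
def pvScanPosGo (f : Nat → String) : Nat → Nat → Option Nat
  | 0, _ => none
  | k+1, t => if f t ∈ pvGuards then some t else pvScanPosGo f k (t+1)

def pvScanPos (f : Nat → String) (bound : Nat) (t : Nat) : Option Nat :=
  pvScanPosGo f (bound - t) t

-- port of Source B `_watched`: is cell (x, y) in some guard's line of sight?
def pvWatched (g : List (List String)) (x y n m : Nat) : Bool :=
  (match pvScanNeg (fun j => (g.getD x []).getD j "") y with
   | some j => (g.getD x []).getD j "" == ">" | none => false) ||
  (match pvScanPos (fun j => (g.getD x []).getD j "") m (y+1) with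
   | some j => (g.getD x []).getD j "" == "<" | none => false) ||
  (match pvScanNeg (fun i => (g.getD i []).getD y "") x with
   | some i => (g.getD i []).getD y "" == "v" | none => false) ||
  (match pvScanPos (fun i => (g.getD i []).getD y "") n (x+1) with
   | some i => (g.getD i []).getD y "" == "^" | none => false)

def check_guard_alt (graph : List (List String)) (N : Int) (M : Int) : List Int :=
  (PySem.List.pyRange 0 N 1).foldl
    (fun start x => (PySem.List.pyRange 0 M 1).foldl
      (fun start y =>
        if ((graph.getD x.toNat []).getD y.toNat "" == "A"
            && !pvWatched graph x.toNat y.toNat N.toNat M.toNat) then [x, y]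
        else start)
      start)
    ([-1, -1] : List Int)

-- ===== PRECONDITION & SPEC =====
-- Pre_ excludes exactly the inputs where A raises IndexError: some scanned position
-- (x, y) with 0 ≤ x < N, 0 ≤ y < M lies outside the actual grid.
def Pre_check_guard (graph : List (List String)) (N : Int) (M : Int) : Prop :=
  0 < N → 0 < M → (N ≤ (graph.length : Int) ∧
    ∀ row ∈ graph.take N.toNat, M ≤ (row.length : Int))
instance (graph : List (List String)) (N : Int) (M : Int) : Decidable (Pre_check_guard graph N M) := by
  unfold Pre_check_guard; infer_instance

def pvWitness_check_guard : List (List String) × Int × Int := ([[">", "A"], [".", "A"]], 2, 2)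

-- closed-form line-of-sight conditions on the input grid (bounded quantifiers only)
-- the nearest blocking cell strictly below index b is a `c`
def pvNearLo (f : Nat → String) (b : Nat) (c : String) : Prop :=
  ∃ j < b, f j = c ∧ ∀ k < b, j < k → f k ∉ pvGuards

-- the nearest blocking cell of [a, b) is a `c`
def pvNearHi (f : Nat → String) (a b : Nat) (c : String) : Prop :=
  ∃ j < b, a ≤ j ∧ f j = c ∧ ∀ k < j, a ≤ k → f k ∉ pvGuards

-- cell (x, y) holds 'A' and is watched neither from the left ('>') nor from above ('v')
def pvVisP (g : List (List String)) (x y : Nat) : Prop :=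
  pvCell g x y = "A" ∧ ¬ pvNearLo (pvCell g x ·) y ">" ∧ ¬ pvNearLo (pvCell g · y) x "v"

-- cell (x, y) is watched from the right ('<') or from below ('^') inside the n×m window
def pvSeenRBP (g : List (List String)) (n m x y : Nat) : Prop :=
  pvNearHi (pvCell g x ·) (y+1) (min m (g.getD x []).length) "<" ∨
  pvNearHi (pvCell g · y) (x+1) (min n g.length) "^"

def D_check_guard (graph : List (List String)) (N : Int) (M : Int) : Prop :=
  ∃ x < min N.toNat graph.length, ∃ y < min M.toNat (graph.getD x []).length,
    pvVisP graph x y ∧ pvSeenRBP graph N.toNat M.toNat x y ∧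
    ∀ x' < min N.toNat graph.length, ∀ y' < min M.toNat (graph.getD x' []).length,
      x < x' ∨ (x = x' ∧ y < y') → ¬ pvVisP graph x' y'
instance (graph : List (List String)) (N : Int) (M : Int) : Decidable (D_check_guard graph N M) := by
  haveI h1 : ∀ a b : Nat, Decidable (pvVisP graph a b) := fun a b => by
    unfold pvVisP pvNearLo; infer_instance
  haveI h2 : ∀ n m a b : Nat, Decidable (pvSeenRBP graph n m a b) := fun n m a b => by
    unfold pvSeenRBP pvNearHi; infer_instance
  haveI h3 : ∀ x y x' : Nat, Decidable (∀ y' < min M.toNat (graph.getD x' []).length,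
      x < x' ∨ (x = x' ∧ y < y') → ¬ pvVisP graph x' y') := fun x y x' => by infer_instance
  unfold D_check_guard
  infer_instance

def Spec_check_guard (graph : List (List String)) (N : Int) (M : Int) (out : List Int) : Prop := ¬ D_check_guard graph N M → out = check_guard_alt graph N M
instance (graph : List (List String)) (N : Int) (M : Int) (out : List Int) : Decidable (Spec_check_guard graph N M out) := by unfold Spec_check_guard; infer_instance

def pvDiffWitness_check_guard : List (List String) × Int × Int := ([["A", "<"]], 1, 2)
def pvDiffWitnessOut_check_guard : (List Int) × (List Int) := ([0, 0], [-1, -1])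

-- ===== CLAIM (what is proved, stated in full; the proofs are below) =====
def Claim_unchanged_check_guard : Prop := ∀ (graph : List (List String)) (N : Int) (M : Int), Dom_check_guard graph N M → Pre_check_guard graph N M → Spec_check_guard graph N M (check_guard graph N M)
def Claim_changed_check_guard : Prop := Dom_check_guard (pvDiffWitness_check_guard.1) (pvDiffWitness_check_guard.2.1) (pvDiffWitness_check_guard.2.2) ∧ Pre_check_guard (pvDiffWitness_check_guard.1) (pvDiffWitness_check_guard.2.1) (pvDiffWitness_check_guard.2.2) ∧ D_check_guard (pvDiffWitness_check_guard.1) (pvDiffWitness_check_guard.2.1) (pvDiffWitness_check_guard.2.2) ∧ check_guard (pvDiffWitness_check_guard.1) (pvDiffWitness_check_guard.2.1) (pvDiffWitness_check_guard.2.2) = pvDiffWitnessOut_check_guard.1 ∧ check_guard_alt (pvDiffWitness_check_guard.1) (pvDiffWitness_check_guard.2.1) (pvDiffWitness_check_guard.2.2) = pvDiffWitnessOut_check_guard.2 ∧ pvDiffWitnessOut_check_guard.1 ≠ pvDiffWitnessOut_check_guard.2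
def Claim_exact_check_guard : Prop := ∀ (graph : List (List String)) (N : Int) (M : Int), Dom_check_guard graph N M → Pre_check_guard graph N M → D_check_guard graph N M → check_guard graph N M ≠ check_guard_alt graph N M

-- ===== LEMMAS AND PROOFS =====

-- nearest blocking cell scanning backward / forward (proof-layer characterizations)
def pvRow (O : List (List String)) (x : Nat) : Nat → String := fun s => (O.getD x []).getD s ""
def pvCol (O : List (List String)) (y : Nat) : Nat → String := fun s => (O.getD s []).getD y ""

def nbF (f : Nat → String) : Nat → Option (Nat × String)
  | 0 => none
  | j+1 => if f j ∈ pvGuards then some (j, f j) else nbF f j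

def nbGGo (f : Nat → String) : Nat → Nat → Option (Nat × String)
  | 0, _ => none
  | k+1, t => if f t ∈ pvGuards then some (t, f t) else nbGGo f k (t+1)

def nbG (f : Nat → String) (bound : Nat) (t : Nat) : Option (Nat × String) :=
  nbGGo f (bound - t) t

-- cell (x, y) holds 'A' and is watched neither from the left ('>') nor from above ('v')
def pvVis (O : List (List String)) (x y : Nat) : Bool :=
  pvCell O x y == "A" &&
  !(match nbF (pvRow O x) y with | some (_, c) => c == ">" | none => false) &&
  !(match nbF (pvCol O y) x with | some (_, c) => c == "v" | none => false)

-- cell (x, y) is watched from the right ('<') or from below ('^')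
def pvSeenRB (O : List (List String)) (n m x y : Nat) : Bool :=
  (match nbG (pvRow O x) m (y+1) with | some (_, c) => c == "<" | none => false) ||
  (match nbG (pvCol O y) n (x+1) with | some (_, c) => c == "^" | none => false)

-- first index s with t ≤ s, and (s ≥ bound or f s blocking)
def stopF (f : Nat → String) (bound : Nat) (t : Nat) : Nat :=
  if h : bound ≤ t then t
  else if f t ∈ pvGuards then t else stopF f bound (t+1)
  termination_by bound - t
  decreasing_by omega

-- coverage after the first k scan positions have been processed (scan order = x*m+y)
def covK (O : List (List String)) (m k x y : Nat) : Bool :=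
  (match nbF (pvRow O x) y with
   | some (p, c) => c == ">" && decide (x*m+p < k)
   | none => false) ||
  (match nbF (pvCol O y) x with
   | some (p, c) => c == "v" && decide (p*m+y < k)
   | none => false)

-- full coverage (every left/up guard processed)
def covF (O : List (List String)) (x y : Nat) : Bool :=
  (match nbF (pvRow O x) y with
   | some (_, c) => c == ">"
   | none => false) ||
  (match nbF (pvCol O y) x with
   | some (_, c) => c == "v"
   | none => false)

-- the grid-state invariant after k scan steps, on the not-yet-scanned region
def pvInv (O g : List (List String)) (n m k : Nat) : Prop :=
  g.length = O.length ∧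
  (∀ i, (g.getD i []).length = (O.getD i []).length) ∧
  ∀ x y, x < n → y < m → k ≤ x*m+y →
    pvCell g x y = if pvCell O x y ∈ pvGuards then pvCell O x y
                   else if covK O m k x y then "o" else pvCell O x y

-- ---- small grid lemmas ----
lemma pvSetCell_length (g : List (List String)) (x y : Nat) (v : String) :
    (pvSetCell g x y v).length = g.length := by
  simp [pvSetCell]

lemma pvSetCell_row_length (g : List (List String)) (x y : Nat) (v : String) (i : Nat) :
    ((pvSetCell g x y v).getD i []).length = (g.getD i []).length := by
  simp only [pvSetCell]
  by_cases hx : x < g.length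
  · by_cases hix : i = x
    · subst hix
      simp [List.getD, hx]
    · simp [List.getD, Ne.symm hix]
  · rw [List.set_eq_of_length_le (by omega)]

lemma pvCell_setCell_ne (g : List (List String)) (x y v : _) (i j : Nat)
    (h : ¬(i = x ∧ j = y)) : pvCell (pvSetCell g x y v) i j = pvCell g i j := by
  simp only [pvCell, pvSetCell]
  by_cases hix : i = x
  · subst hix
    have hj : y ≠ j := fun hj => h ⟨rfl, hj.symm⟩
    by_cases hx : i < g.length
    · simp [List.getD, hx, hj]
    · rw [List.set_eq_of_length_le (by omega)]
  · have hxi : x ≠ i := fun h' => hix h'.symm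
    by_cases hx : x < g.length
    · simp [List.getD, hxi]
    · rw [List.set_eq_of_length_le (by omega)]

lemma pvCell_setCell_self (g : List (List String)) (x y : Nat) (v : String)
    (hx : x < g.length) (hy : y < (g.getD x []).length) :
    pvCell (pvSetCell g x y v) x y = v := by
  rw [List.getD_eq_getElem _ _ hx] at hy
  simp [pvCell, pvSetCell, List.getD, hx, hy]

-- ---- nbF lemmas ----
lemma nbF_some (f : Nat → String) (j p : Nat) (c : String) (h : nbF f j = some (p, c)) :
    f p = c ∧ p < j ∧ c ∈ pvGuards ∧ ∀ t, p < t → t < j → f t ∉ pvGuards := by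
  induction j with
  | zero => simp [nbF] at h
  | succ j ih =>
    simp only [nbF] at h
    by_cases hg : f j ∈ pvGuards
    · rw [if_pos hg] at h
      obtain ⟨hp, hc⟩ := by simpa using h
      subst hp; subst hc
      exact ⟨rfl, Nat.lt_succ_self j, hg, fun t h1 h2 => by omega⟩
    · rw [if_neg hg] at h
      obtain ⟨h1, h2, h3, h4⟩ := ih h
      refine ⟨h1, by omega, h3, fun t ht1 ht2 => ?_⟩
      rcases Nat.lt_or_ge t j with ht | ht
      · exact h4 t ht1 ht
      · have : t = j := by omega
        subst this; exact hg

lemma nbF_eq_some (f : Nat → String) (j p : Nat) (h1 : p < j) (h2 : f p ∈ pvGuards)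
    (h3 : ∀ t, p < t → t < j → f t ∉ pvGuards) : nbF f j = some (p, f p) := by
  induction j with
  | zero => omega
  | succ j ih =>
    simp only [nbF]
    rcases Nat.lt_or_ge p j with hpj | hpj
    · rw [if_neg (h3 j (by omega) (by omega))]
      exact ih hpj fun t ht1 ht2 => h3 t ht1 (by omega)
    · have : p = j := by omega
      subst this
      rw [if_pos h2]

-- ---- stopF lemmas ----
lemma stopF_ge (f : Nat → String) (b t : Nat) : t ≤ stopF f b t := by
  fun_induction stopF with
  | case1 t h => omega
  | case2 t h1 h2 => omega
  | case3 t h1 h2 ih => omega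

lemma stopF_nonguard (f : Nat → String) (b t : Nat) :
    ∀ s, t ≤ s → s < stopF f b t → f s ∉ pvGuards := by
  fun_induction stopF with
  | case1 t h => intro s h1 h2; omega
  | case2 t h1 h2 => intro s hs1 hs2; omega
  | case3 t h1 h2 ih =>
    intro s hs1 hs2
    rcases Nat.lt_or_ge t s with ht | ht
    · exact ih s (by omega) hs2
    · have : s = t := by omega
      subst this; exact h2

lemma lt_stopF (f : Nat → String) (b t j : Nat) :
    t ≤ j → j < b → (∀ s, t ≤ s → s ≤ j → f s ∉ pvGuards) → j < stopF f b t := by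
  fun_induction stopF with
  | case1 t ht => intro h1 h2 h3; omega
  | case2 t hb hg => intro h1 h2 h3; exact absurd hg (h3 t (by omega) h1)
  | case3 t hb hg ih =>
    intro h1 h2 h3
    rcases Nat.lt_or_ge t j with ht | ht
    · exact ih ht h2 fun s hs1 hs2 => h3 s (by omega) hs2
    · have hgt := stopF_ge f b (t+1)
      omega

lemma stopF_congr_mem (f f' : Nat → String) (b t : Nat)
    (h : ∀ s, t ≤ s → s < b → (f s ∈ pvGuards ↔ f' s ∈ pvGuards)) :
    stopF f b t = stopF f' b t := by
  fun_induction stopF f b t with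
  | case1 t ht => conv_rhs => rw [stopF, dif_pos ht]
  | case2 t h1 h2 =>
    conv_rhs => rw [stopF]
    rw [dif_neg h1, if_pos ((h t (by omega) (by omega)).mp h2)]
  | case3 t h1 h2 ih =>
    conv_rhs => rw [stopF]
    rw [dif_neg h1, if_neg (fun hc => h2 (((h t (by omega) (by omega))).mpr hc))]
    exact ih fun s hs1 hs2 => h s (by omega) hs2

lemma stopF_eq_of (f : Nat → String) (b t : Nat) (h1 : t < b) (h2 : f t ∉ pvGuards) :
    stopF f b t = stopF f b (t+1) := by
  rw [stopF, dif_neg (by omega), if_neg h2]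

lemma stopF_eq_self_of_ge (f : Nat → String) (b t : Nat) (h : b ≤ t) : stopF f b t = t := by
  rw [stopF, dif_pos h]

lemma stopF_eq_self_of_guard (f : Nat → String) (b t : Nat) (h1 : t < b) (h2 : f t ∈ pvGuards) :
    stopF f b t = t := by
  rw [stopF, dif_neg (by omega), if_pos h2]

-- ---- markA lemmas ----
lemma markA_length (fuel : Nat) : ∀ (g : List (List String)) (x y N M : Int) (d : String),
    (markA fuel g x y N M d).length = g.length ∧
    ∀ i, ((markA fuel g x y N M d).getD i []).length = (g.getD i []).length := by
  induction fuel with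
  | zero => intro g x y N M d; exact ⟨rfl, fun i => rfl⟩
  | succ fuel ih =>
    intro g x y N M d
    rw [markA]
    by_cases h1 : (x < 0 ∨ N ≤ x)
    · rw [if_pos h1]; exact ⟨rfl, fun i => rfl⟩
    · rw [if_neg h1]
      by_cases h2 : (y < 0 ∨ M ≤ y)
      · rw [if_pos h2]; exact ⟨rfl, fun i => rfl⟩
      · rw [if_neg h2]
        by_cases h3 : pvCell g x.toNat y.toNat ∈ pvGuards
        · rw [if_pos h3]; exact ⟨rfl, fun i => rfl⟩
        · rw [if_neg h3]
          have hif : ∀ (c : Prop) (inst : Decidable c) (gg : List (List String))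
              (x' y' : Int) (d' : String),
              (gg.length = g.length ∧ ∀ i, ((gg.getD i []).length = (g.getD i []).length)) →
              ((if c then markA fuel gg x' y' N M d' else gg).length = g.length ∧
               ∀ i, (((if c then markA fuel gg x' y' N M d' else gg).getD i []).length
                      = (g.getD i []).length)) := by
            intro c inst gg x' y' d' hgg
            split
            · obtain ⟨ha, hb⟩ := ih gg x' y' N M d'
              exact ⟨ha.trans hgg.1, fun i => (hb i).trans (hgg.2 i)⟩
            · exact hgg
          have h0 : (pvSetCell g x.toNat y.toNat "o").length = g.length ∧
              ∀ i, (((pvSetCell g x.toNat y.toNat "o").getD i []).length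
                     = (g.getD i []).length) :=
            ⟨pvSetCell_length g _ _ _, fun i => pvSetCell_row_length g _ _ _ i⟩
          exact hif _ _ _ _ _ _ (hif _ _ _ _ _ _ (hif _ _ _ _ _ _ (hif _ _ _ _ _ _ h0)))

lemma markA_right (fuel : Nat) : ∀ (g : List (List String)) (x t n m : Nat),
    x < n → x < g.length → m ≤ (g.getD x []).length → m - t < fuel →
    ∀ i j, pvCell (markA fuel g ↑x ↑t ↑n ↑m "right") i j =
      if i = x ∧ t ≤ j ∧ j < stopF (pvRow g x) m t then "o" else pvCell g i j := by
  induction fuel with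
  | zero => intro g x t n m hxn hxg hmg hf i j; omega
  | succ fuel ih =>
    intro g x t n m hxn hxg hmg hf i j
    rw [markA]
    rw [if_neg (by omega : ¬((x:Int) < 0 ∨ (n:Int) ≤ (x:Int)))]
    by_cases hb2 : ((t:Int) < 0 ∨ (m:Int) ≤ (t:Int))
    · rw [if_pos hb2]
      have hmt : m ≤ t := by push_cast at hb2; omega
      rw [stopF_eq_self_of_ge _ _ _ hmt, if_neg (by omega : ¬(i = x ∧ t ≤ j ∧ j < t))]
    · rw [if_neg hb2]
      have htm : t < m := by push_cast at hb2; omega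
      have hcast : pvCell g (↑x : Int).toNat (↑t : Int).toNat = pvCell g x t := by
        simp
      by_cases hg : pvCell g x t ∈ pvGuards
      · rw [if_pos (by rw [hcast]; exact hg)]
        have hst : stopF (pvRow g x) m t = t := stopF_eq_self_of_guard _ _ _ htm hg
        rw [hst, if_neg (by omega : ¬(i = x ∧ t ≤ j ∧ j < t))]
      · rw [if_neg (by rw [hcast]; exact hg)]
        simp only [Int.toNat_natCast, reduceIte, String.reduceEq]
        have harg : (↑t : Int) + 1 = ((t+1 : Nat) : Int) := by push_cast; ring
        rw [harg]
        set g1 := pvSetCell g x t "o" with hg1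
        have hlen1 : g1.length = g.length := pvSetCell_length g _ _ _
        have hrow1 : ∀ i', (g1.getD i' []).length = (g.getD i' []).length :=
          fun i' => pvSetCell_row_length g _ _ _ i'
        have hcells : ∀ i' j', ¬(i' = x ∧ j' = t) → pvCell g1 i' j' = pvCell g i' j' :=
          fun i' j' h => pvCell_setCell_ne g _ _ _ i' j' h
        have hstopc : stopF (pvRow g1 x) m (t+1) = stopF (pvRow g x) m (t+1) := by
          apply stopF_congr_mem
          intro s hs1 hs2
          have : pvRow g1 x s = pvRow g x s := hcells x s (by omega)
          rw [this]
        have hstop0 : stopF (pvRow g x) m t = stopF (pvRow g x) m (t+1) :=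
          stopF_eq_of _ _ _ htm hg
        have := ih g1 x (t+1) n m hxn (by omega) (by rw [hrow1 x]; exact hmg) (by omega) i j
        rw [hstopc] at this
        rw [this, ← hstop0]
        have hts : t < stopF (pvRow g x) m t := by
          rw [hstop0]; have := stopF_ge (pvRow g x) m (t+1); omega
        by_cases hij : i = x ∧ j = t
        · obtain ⟨hi, hj⟩ := hij
          subst hi; subst hj
          rw [if_neg (by omega : ¬(i = i ∧ j + 1 ≤ j ∧ j < stopF (pvRow g i) m j)),
            if_pos (⟨rfl, le_refl j, hts⟩ : i = i ∧ j ≤ j ∧ j < stopF (pvRow g i) m j)]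
          exact pvCell_setCell_self g i j "o" hxg (by omega)
        · rw [hcells i j hij]
          by_cases hc1 : i = x ∧ t ≤ j ∧ j < stopF (pvRow g x) m t
          · rw [if_pos (by omega : i = x ∧ t+1 ≤ j ∧ j < stopF (pvRow g x) m t), if_pos hc1]
          · rw [if_neg (by omega : ¬(i = x ∧ t+1 ≤ j ∧ j < stopF (pvRow g x) m t)), if_neg hc1]

lemma markA_down (fuel : Nat) : ∀ (g : List (List String)) (t y n m : Nat),
    y < m → n ≤ g.length → (∀ s, s < n → m ≤ (g.getD s []).length) → n - t < fuel →
    ∀ i j, pvCell (markA fuel g ↑t ↑y ↑n ↑m "down") i j =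
      if j = y ∧ t ≤ i ∧ i < stopF (pvCol g y) n t then "o" else pvCell g i j := by
  induction fuel with
  | zero => intro g t y n m hym hng hrows hf i j; omega
  | succ fuel ih =>
    intro g t y n m hym hng hrows hf i j
    rw [markA]
    by_cases hb1 : ((t:Int) < 0 ∨ (n:Int) ≤ (t:Int))
    · rw [if_pos hb1]
      have hnt : n ≤ t := by push_cast at hb1; omega
      rw [stopF_eq_self_of_ge _ _ _ hnt, if_neg (by omega : ¬(j = y ∧ t ≤ i ∧ i < t))]
    · rw [if_neg hb1]
      have htn : t < n := by push_cast at hb1; omega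
      rw [if_neg (by omega : ¬((y:Int) < 0 ∨ (m:Int) ≤ (y:Int)))]
      have hcast : pvCell g (↑t : Int).toNat (↑y : Int).toNat = pvCell g t y := by
        simp
      by_cases hg : pvCell g t y ∈ pvGuards
      · rw [if_pos (by rw [hcast]; exact hg)]
        have hst : stopF (pvCol g y) n t = t := stopF_eq_self_of_guard _ _ _ htn hg
        rw [hst, if_neg (by omega : ¬(j = y ∧ t ≤ i ∧ i < t))]
      · rw [if_neg (by rw [hcast]; exact hg)]
        simp only [Int.toNat_natCast, reduceIte, String.reduceEq]
        have harg : (↑t : Int) + 1 = ((t+1 : Nat) : Int) := by push_cast; ring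
        rw [harg]
        set g1 := pvSetCell g t y "o" with hg1
        have hlen1 : g1.length = g.length := pvSetCell_length g _ _ _
        have hrow1 : ∀ i', (g1.getD i' []).length = (g.getD i' []).length :=
          fun i' => pvSetCell_row_length g _ _ _ i'
        have hcells : ∀ i' j', ¬(i' = t ∧ j' = y) → pvCell g1 i' j' = pvCell g i' j' :=
          fun i' j' h => pvCell_setCell_ne g _ _ _ i' j' h
        have hstopc : stopF (pvCol g1 y) n (t+1) = stopF (pvCol g y) n (t+1) := by
          apply stopF_congr_mem
          intro s hs1 hs2
          have : pvCol g1 y s = pvCol g y s := hcells s y (by omega)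
          rw [this]
        have hstop0 : stopF (pvCol g y) n t = stopF (pvCol g y) n (t+1) :=
          stopF_eq_of _ _ _ htn hg
        have := ih g1 (t+1) y n m hym (by omega)
          (fun s hs => by rw [hrow1 s]; exact hrows s hs) (by omega) i j
        rw [hstopc] at this
        rw [this, ← hstop0]
        have hts : t < stopF (pvCol g y) n t := by
          rw [hstop0]; have := stopF_ge (pvCol g y) n (t+1); omega
        by_cases hij : i = t ∧ j = y
        · obtain ⟨hi, hj⟩ := hij
          subst hi; subst hj
          rw [if_neg (by omega : ¬(j = j ∧ i + 1 ≤ i ∧ i < stopF (pvCol g j) n i)),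
            if_pos (⟨rfl, le_refl i, hts⟩ : j = j ∧ i ≤ i ∧ i < stopF (pvCol g j) n i)]
          exact pvCell_setCell_self g i j "o" (by omega)
            (by have := hrows i (by omega); omega)
        · rw [hcells i j hij]
          by_cases hc1 : j = y ∧ t ≤ i ∧ i < stopF (pvCol g y) n t
          · rw [if_pos (by omega : j = y ∧ t+1 ≤ i ∧ i < stopF (pvCol g y) n t), if_pos hc1]
          · rw [if_neg (by omega : ¬(j = y ∧ t+1 ≤ i ∧ i < stopF (pvCol g y) n t)), if_neg hc1]

lemma markA_left (fuel : Nat) : ∀ (g : List (List String)) (x : Nat) (t : Int) (N M : Int)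
    (i j : Nat), (i ≠ x ∨ t < (j : Int)) →
    pvCell (markA fuel g ↑x t N M "left") i j = pvCell g i j := by
  induction fuel with
  | zero => intro g x t N M i j h; rfl
  | succ fuel ih =>
    intro g x t N M i j h
    rw [markA]
    by_cases hb1 : ((x:Int) < 0 ∨ N ≤ (x:Int))
    · rw [if_pos hb1]
    · rw [if_neg hb1]
      by_cases hb2 : (t < 0 ∨ M ≤ t)
      · rw [if_pos hb2]
      · rw [if_neg hb2]
        by_cases hg : pvCell g (↑x : Int).toNat t.toNat ∈ pvGuards
        · rw [if_pos hg]
        · rw [if_neg hg]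
          simp only [Int.toNat_natCast, reduceIte, String.reduceEq]
          have ht0 : 0 ≤ t := by omega
          have hne : ¬(i = x ∧ j = t.toNat) := by
            rcases h with h | h
            · exact fun hc => h hc.1
            · exact fun hc => by omega
          rw [ih _ x (t-1) N M i j (by rcases h with h | h; exact Or.inl h; exact Or.inr (by omega))]
          exact pvCell_setCell_ne g _ _ _ i j hne

lemma markA_up (fuel : Nat) : ∀ (g : List (List String)) (y : Nat) (t : Int) (N M : Int)
    (i j : Nat), (j ≠ y ∨ t < (i : Int)) →
    pvCell (markA fuel g t ↑y N M "up") i j = pvCell g i j := by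
  induction fuel with
  | zero => intro g y t N M i j h; rfl
  | succ fuel ih =>
    intro g y t N M i j h
    rw [markA]
    by_cases hb1 : (t < 0 ∨ N ≤ t)
    · rw [if_pos hb1]
    · rw [if_neg hb1]
      by_cases hb2 : ((y:Int) < 0 ∨ M ≤ (y:Int))
      · rw [if_pos hb2]
      · rw [if_neg hb2]
        by_cases hg : pvCell g t.toNat (↑y : Int).toNat ∈ pvGuards
        · rw [if_pos hg]
        · rw [if_neg hg]
          simp only [Int.toNat_natCast, reduceIte, String.reduceEq]
          have ht0 : 0 ≤ t := by omega
          have hne : ¬(i = t.toNat ∧ j = y) := by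
            rcases h with h | h
            · exact fun hc => h hc.2
            · exact fun hc => by omega
          rw [ih _ y (t-1) N M i j (by rcases h with h | h; exact Or.inl h; exact Or.inr (by omega))]
          exact pvCell_setCell_ne g _ _ _ i j hne

-- ---- arithmetic helper ----
lemma ordUnique (m i p x y : Nat) (_hm : 0 < m) (hp : p < m) (hy : y < m)
    (h : i*m+p = x*m+y) : i = x ∧ p = y := by
  have hix : i = x := by
    by_contra hne
    rcases Nat.lt_or_ge i x with hlt | hge
    · have h4 : (i+1)*m ≤ x*m := Nat.mul_le_mul_right m hlt
      have h5 : i*m+p < (i+1)*m := by rw [Nat.add_mul]; omega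
      omega
    · have hlt : x < i := by omega
      have h4 : (x+1)*m ≤ i*m := Nat.mul_le_mul_right m hlt
      have h5 : x*m+y < (x+1)*m := by rw [Nat.add_mul]; omega
      omega
  subst hix
  exact ⟨rfl, by omega⟩

lemma covK_mono (O : List (List String)) (m k k' x y : Nat) (h : k ≤ k')
    (hc : covK O m k x y = true) : covK O m k' x y = true := by
  unfold covK at hc ⊢
  rcases hn : nbF (pvRow O x) y with _ | ⟨p, c⟩ <;>
      rcases hn2 : nbF (pvCol O y) x with _ | ⟨p2, c2⟩ <;>
    simp only [hn, hn2, Bool.or_eq_true, Bool.and_eq_true, decide_eq_true_eq,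
      Bool.false_or, Bool.or_false] at hc ⊢
  · exact hc
  · exact ⟨hc.1, by omega⟩
  · exact ⟨hc.1, by omega⟩
  · rcases hc with hc | hc
    · exact Or.inl ⟨hc.1, by omega⟩
    · exact Or.inr ⟨hc.1, by omega⟩

lemma covK_self (O : List (List String)) (m x y : Nat) (hm : 0 < m) :
    covK O m (x*m+y) x y = covF O x y := by
  unfold covK covF
  congr 1
  · rcases hn : nbF (pvRow O x) y with _ | ⟨p, c⟩
    · rfl
    · have := (nbF_some _ _ _ _ hn).2.1
      have harith : x*m+p < x*m+y := by omega
      simp [harith]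
  · rcases hn : nbF (pvCol O y) x with _ | ⟨p, c⟩
    · rfl
    · have := (nbF_some _ _ _ _ hn).2.1
      have harith : p*m+y < x*m+y := by
        have : p*m < x*m := (Nat.mul_lt_mul_right hm).mpr this
        omega
      simp [harith]

lemma vis_iff (O : List (List String)) (x y : Nat) :
    pvVis O x y = true ↔ (pvCell O x y = "A" ∧ covF O x y = false) := by
  unfold pvVis covF
  rcases hn : nbF (pvRow O x) y with _ | ⟨p, c⟩ <;>
    rcases hn2 : nbF (pvCol O y) x with _ | ⟨p2, c2⟩ <;> simp [and_assoc]

lemma memg_iff (O g : List (List String)) (n m k : Nat) (hInv : pvInv O g n m k)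
    (i j : Nat) (hi : i < n) (hj : j < m) (hk : k ≤ i*m+j) :
    pvCell g i j ∈ pvGuards ↔ pvCell O i j ∈ pvGuards := by
  rw [hInv.2.2 i j hi hj hk]
  split_ifs with h1 h2
  · exact Iff.rfl
  · exact iff_of_false (by decide) h1
  · exact Iff.rfl

lemma covK_succ (O : List (List String)) (m x y i j : Nat)
    (hy : y < m) (hj : j < m)
    (hcov : covK O m (x*m+y+1) i j = true) :
    covK O m (x*m+y) i j = true ∨
    (i = x ∧ y < j ∧ nbF (pvRow O x) j = some (y, ">")) ∨
    (j = y ∧ x < i ∧ nbF (pvCol O y) i = some (x, "v")) := by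
  unfold covK at hcov ⊢
  rcases hn : nbF (pvRow O i) j with _ | ⟨p, c⟩ <;>
      rcases hn2 : nbF (pvCol O j) i with _ | ⟨p2, c2⟩ <;>
    simp only [hn, hn2, Bool.or_eq_true, Bool.and_eq_true, decide_eq_true_eq,
      Bool.false_or, Bool.or_false] at hcov ⊢
  · exact Or.inl hcov
  · -- col branch only
    rcases Nat.lt_or_ge (p2*m+j) (x*m+y) with hlt | hge
    · exact Or.inl ⟨hcov.1, hlt⟩
    · have heq : p2*m+j = x*m+y := by omega
      have hp2 : p2 < i := (nbF_some _ _ _ _ hn2).2.1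
      obtain ⟨hpe, hje⟩ := ordUnique m p2 j x y (by omega) hj hy heq
      subst hpe; subst hje
      refine Or.inr (Or.inr ⟨rfl, by omega, ?_⟩)
      rw [hn2, (by simpa using (beq_iff_eq).mp hcov.1 : c2 = "v")]
  · -- row branch only
    rcases Nat.lt_or_ge (i*m+p) (x*m+y) with hlt | hge
    · exact Or.inl ⟨hcov.1, hlt⟩
    · have heq : i*m+p = x*m+y := by omega
      have hp : p < j := (nbF_some _ _ _ _ hn).2.1
      obtain ⟨hie, hpe⟩ := ordUnique m i p x y (by omega) (by omega) hy heq
      subst hie; subst hpe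
      refine Or.inr (Or.inl ⟨rfl, by omega, ?_⟩)
      rw [hn, (by simpa using (beq_iff_eq).mp hcov.1 : c = ">")]
  · rcases hcov with hcov | hcov
    · rcases Nat.lt_or_ge (i*m+p) (x*m+y) with hlt | hge
      · exact Or.inl (Or.inl ⟨hcov.1, hlt⟩)
      · have heq : i*m+p = x*m+y := by omega
        have hp : p < j := (nbF_some _ _ _ _ hn).2.1
        obtain ⟨hie, hpe⟩ := ordUnique m i p x y (by omega) (by omega) hy heq
        subst hie; subst hpe
        refine Or.inr (Or.inl ⟨rfl, by omega, ?_⟩)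
        rw [hn, (by simpa using (beq_iff_eq).mp hcov.1 : c = ">")]
    · rcases Nat.lt_or_ge (p2*m+j) (x*m+y) with hlt | hge
      · exact Or.inl (Or.inr ⟨hcov.1, hlt⟩)
      · have heq : p2*m+j = x*m+y := by omega
        have hp2 : p2 < i := (nbF_some _ _ _ _ hn2).2.1
        obtain ⟨hpe, hje⟩ := ordUnique m p2 j x y (by omega) hj hy heq
        subst hpe; subst hje
        refine Or.inr (Or.inr ⟨rfl, by omega, ?_⟩)
        rw [hn2, (by simpa using (beq_iff_eq).mp hcov.1 : c2 = "v")]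

-- ---- the step lemma ----
lemma pvStep_spec (O g : List (List String)) (n m x y : Nat)
    (hlen : n ≤ O.length) (hrows : ∀ i, i < n → m ≤ (O.getD i []).length)
    (hx : x < n) (hy : y < m)
    (hInv : pvInv O g n m (x*m+y)) (start : List Int) :
    pvInv O (pvStepA ↑n ↑m (g, start) ↑x ↑y).1 n m (x*m+y+1) ∧
    (pvStepA ↑n ↑m (g, start) ↑x ↑y).2 =
      (if pvVis O x y then [(x : Int), (y : Int)] else start) := by
  obtain ⟨hl, hr, hcell⟩ := hInv
  have hm : 0 < m := by omega
  have hw := hcell x y hx hy (le_refl _)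
  have hxg : x < g.length := by omega
  have hrowm : m ≤ (g.getD x []).length := by rw [hr x]; exact hrows x hx
  have hglen : n ≤ g.length := by omega
  have hgrows : ∀ i, i < n → m ≤ (g.getD i []).length := fun i hi => by
    rw [hr i]; exact hrows i hi
  by_cases hOg : pvCell O x y ∈ pvGuards
  · rw [if_pos hOg] at hw
    have hnA : pvCell O x y ≠ "A" := fun h => by rw [h] at hOg; exact absurd hOg (by decide)
    have hvisf : ¬(pvVis O x y = true) := fun hv => hnA ((vis_iff O x y).mp hv).1
    have hOcases : pvCell O x y = "X" ∨ pvCell O x y = "<" ∨ pvCell O x y = ">" ∨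
        pvCell O x y = "^" ∨ pvCell O x y = "v" := by
      simpa [pvGuards] using hOg
    rcases hOcases with hcase | hcase | hcase | hcase | hcase
    · -- "X": nothing happens
      have hgxy : pvCell g x y = "X" := by rw [hw, hcase]
      have hstep : pvStepA ↑n ↑m (g, start) ↑x ↑y = (g, start) := by
        simp only [pvStepA, Int.toNat_natCast, hgxy, reduceIte, String.reduceEq]
      rw [hstep]
      refine ⟨⟨hl, hr, ?_⟩, by rw [if_neg hvisf]⟩
      intro i j hi hj hord
      rw [hcell i j hi hj (by omega)]
      by_cases hOg2 : pvCell O i j ∈ pvGuards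
      · rw [if_pos hOg2, if_pos hOg2]
      · rw [if_neg hOg2, if_neg hOg2]
        by_cases hck : covK O m (x*m+y) i j = true
        · rw [if_pos hck, if_pos (covK_mono _ _ _ _ _ _ (by omega) hck)]
        · have hck1 : ¬(covK O m (x*m+y+1) i j = true) := by
            intro hc1
            rcases covK_succ O m x y i j hy hj hc1 with h | ⟨hi', hlt, hnb⟩ | ⟨hj', hlt, hnb⟩
            · exact hck h
            · have := (nbF_some _ _ _ _ hnb).1
              rw [show pvRow O x y = pvCell O x y from rfl, hcase] at this
              simp at this
            · have := (nbF_some _ _ _ _ hnb).1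
              rw [show pvCol O y x = pvCell O x y from rfl, hcase] at this
              simp at this
          rw [if_neg hck, if_neg hck1]
    · -- "<"
      have hgxy : pvCell g x y = "<" := by rw [hw, hcase]
      have hc2 : pvCell (markA (n+m+1) (pvSetCell g x y "o") ↑x ((y:Int)-1) ↑n ↑m "left") x y
          = "o" := by
        rw [markA_left (n+m+1) (pvSetCell g x y "o") x ((y:Int)-1) ↑n ↑m x y
          (Or.inr (by omega))]
        exact pvCell_setCell_self g x y "o" hxg (by omega)
      have hstep : pvStepA ↑n ↑m (g, start) ↑x ↑y =
          (markA (n+m+1) (pvSetCell g x y "o") ↑x ((y:Int)-1) ↑n ↑m "left", start) := by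
        simp only [pvStepA, Int.toNat_natCast, hgxy, reduceIte, String.reduceEq]
        simp only [hc2, reduceIte, String.reduceEq]
      rw [hstep]
      have hml := markA_length (n+m+1) (pvSetCell g x y "o") ↑x ((y:Int)-1) ↑n ↑m "left"
      have hlen1 : (pvSetCell g x y "o").length = g.length := pvSetCell_length g _ _ _
      have hrow1 : ∀ i', ((pvSetCell g x y "o").getD i' []).length = (g.getD i' []).length :=
        fun i' => pvSetCell_row_length g _ _ _ i'
      refine ⟨⟨hml.1.trans (hlen1.trans hl), fun i => ((hml.2 i).trans (hrow1 i)).trans (hr i), ?_⟩,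
        by rw [if_neg hvisf]⟩
      intro i j hi hj hord
      have hne_xy : ¬(i = x ∧ j = y) := by rintro ⟨rfl, rfl⟩; omega
      have hcond : i ≠ x ∨ ((y:Int)-1 < (j:Int)) := by
        rcases eq_or_ne i x with h | h
        · subst h
          right
          omega
        · exact Or.inl h
      rw [markA_left (n+m+1) (pvSetCell g x y "o") x ((y:Int)-1) ↑n ↑m i j hcond,
        pvCell_setCell_ne g x y "o" i j hne_xy, hcell i j hi hj (by omega)]
      by_cases hOg2 : pvCell O i j ∈ pvGuards
      · rw [if_pos hOg2, if_pos hOg2]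
      · rw [if_neg hOg2, if_neg hOg2]
        by_cases hck : covK O m (x*m+y) i j = true
        · rw [if_pos hck, if_pos (covK_mono _ _ _ _ _ _ (by omega) hck)]
        · have hck1 : ¬(covK O m (x*m+y+1) i j = true) := by
            intro hc1
            rcases covK_succ O m x y i j hy hj hc1 with h | ⟨hi', hlt, hnb⟩ | ⟨hj', hlt, hnb⟩
            · exact hck h
            · have := (nbF_some _ _ _ _ hnb).1
              rw [show pvRow O x y = pvCell O x y from rfl, hcase] at this
              simp at this
            · have := (nbF_some _ _ _ _ hnb).1
              rw [show pvCol O y x = pvCell O x y from rfl, hcase] at this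
              simp at this
          rw [if_neg hck, if_neg hck1]
    · -- ">"
      have hgxy : pvCell g x y = ">" := by rw [hw, hcase]
      have hlen1 : (pvSetCell g x y "o").length = g.length := pvSetCell_length g _ _ _
      have hrow1 : ∀ i', ((pvSetCell g x y "o").getD i' []).length = (g.getD i' []).length :=
        fun i' => pvSetCell_row_length g _ _ _ i'
      have hchar := markA_right (n+m+1) (pvSetCell g x y "o") x (y+1) n m hx
        (by omega) (by rw [hrow1 x]; exact hrowm) (by omega)
      rw [show ((y+1 : Nat) : Int) = (y:Int)+1 by push_cast; ring] at hchar
      have hS : stopF (pvRow (pvSetCell g x y "o") x) m (y+1) = stopF (pvRow O x) m (y+1) := by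
        apply stopF_congr_mem
        intro s hs1 hs2
        have h1 : pvRow (pvSetCell g x y "o") x s = pvCell g x s :=
          pvCell_setCell_ne g x y "o" x s (by omega)
        rw [show pvRow (pvSetCell g x y "o") x s = pvCell (pvSetCell g x y "o") x s from rfl,
          pvCell_setCell_ne g x y "o" x s (by omega),
          show pvRow O x s = pvCell O x s from rfl]
        exact memg_iff O g n m (x*m+y) ⟨hl, hr, hcell⟩ x s hx hs2 (by omega)
      rw [hS] at hchar
      have hc2 : pvCell (markA (n+m+1) (pvSetCell g x y "o") ↑x ((y:Int)+1) ↑n ↑m "right") x y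
          = "o" := by
        rw [hchar x y, if_neg (by omega : ¬(x = x ∧ y+1 ≤ y ∧ y < stopF (pvRow O x) m (y+1)))]
        exact pvCell_setCell_self g x y "o" hxg (by omega)
      have hstep : pvStepA ↑n ↑m (g, start) ↑x ↑y =
          (markA (n+m+1) (pvSetCell g x y "o") ↑x ((y:Int)+1) ↑n ↑m "right", start) := by
        simp only [pvStepA, Int.toNat_natCast, hgxy, reduceIte, String.reduceEq]
        simp only [hc2, reduceIte, String.reduceEq]
      rw [hstep]
      have hml := markA_length (n+m+1) (pvSetCell g x y "o") ↑x ((y:Int)+1) ↑n ↑m "right"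
      refine ⟨⟨hml.1.trans (hlen1.trans hl), fun i => ((hml.2 i).trans (hrow1 i)).trans (hr i), ?_⟩,
        by rw [if_neg hvisf]⟩
      intro i j hi hj hord
      have hne_xy : ¬(i = x ∧ j = y) := by rintro ⟨rfl, rfl⟩; omega
      by_cases hray : i = x ∧ y+1 ≤ j ∧ j < stopF (pvRow O x) m (y+1)
      · rw [hchar i j, if_pos hray]
        obtain ⟨hi', hj1, hj2⟩ := hray
        subst hi'
        have hOnb : pvCell O i j ∉ pvGuards := stopF_nonguard (pvRow O i) m (y+1) j hj1 hj2
        have hnb : nbF (pvRow O i) j = some (y, ">") := by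
          have hbet : ∀ t, y < t → t < j → pvRow O i t ∉ pvGuards := fun t ht1 ht2 =>
            stopF_nonguard (pvRow O i) m (y+1) t (by omega) (by omega)
          have := nbF_eq_some (pvRow O i) j y (by omega)
            (by rw [show pvRow O i y = pvCell O i y from rfl, hcase]; decide) hbet
          rw [show pvRow O i y = pvCell O i y from rfl, hcase] at this
          exact this
        have hcov : covK O m (i*m+y+1) i j = true := by
          unfold covK
          rw [hnb]
          simp
        rw [if_neg hOnb, if_pos hcov]
      · rw [hchar i j, if_neg hray, pvCell_setCell_ne g x y "o" i j hne_xy,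
          hcell i j hi hj (by omega)]
        by_cases hOg2 : pvCell O i j ∈ pvGuards
        · rw [if_pos hOg2, if_pos hOg2]
        · rw [if_neg hOg2, if_neg hOg2]
          by_cases hck : covK O m (x*m+y) i j = true
          · rw [if_pos hck, if_pos (covK_mono _ _ _ _ _ _ (by omega) hck)]
          · have hck1 : ¬(covK O m (x*m+y+1) i j = true) := by
              intro hc1
              rcases covK_succ O m x y i j hy hj hc1 with h | ⟨hi', hlt, hnb⟩ | ⟨hj', hlt, hnb⟩
              · exact hck h
              · have hbet := (nbF_some _ _ _ _ hnb).2.2.2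
                have hjS : j < stopF (pvRow O x) m (y+1) := by
                  apply lt_stopF (pvRow O x) m (y+1) j (by omega) hj
                  intro s hs1 hs2
                  rcases Nat.lt_or_ge s j with h' | h'
                  · exact hbet s (by omega) h'
                  · have hsj : s = j := by omega
                    subst hsj
                    intro hgs
                    exact hOg2 (by rw [hi']; exact hgs)
                exact hray ⟨hi', by omega, hjS⟩
              · have := (nbF_some _ _ _ _ hnb).1
                rw [show pvCol O y x = pvCell O x y from rfl, hcase] at this
                simp at this
            rw [if_neg hck, if_neg hck1]
    · -- "^"
      have hgxy : pvCell g x y = "^" := by rw [hw, hcase]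
      have hstep : pvStepA ↑n ↑m (g, start) ↑x ↑y =
          (markA (n+m+1) (pvSetCell g x y "o") ((x:Int)-1) ↑y ↑n ↑m "up", start) := by
        simp only [pvStepA, Int.toNat_natCast, hgxy, reduceIte, String.reduceEq]
      rw [hstep]
      have hml := markA_length (n+m+1) (pvSetCell g x y "o") ((x:Int)-1) ↑y ↑n ↑m "up"
      have hlen1 : (pvSetCell g x y "o").length = g.length := pvSetCell_length g _ _ _
      have hrow1 : ∀ i', ((pvSetCell g x y "o").getD i' []).length = (g.getD i' []).length :=
        fun i' => pvSetCell_row_length g _ _ _ i'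
      refine ⟨⟨hml.1.trans (hlen1.trans hl), fun i => ((hml.2 i).trans (hrow1 i)).trans (hr i), ?_⟩,
        by rw [if_neg hvisf]⟩
      intro i j hi hj hord
      have hne_xy : ¬(i = x ∧ j = y) := by rintro ⟨rfl, rfl⟩; omega
      have hcond : j ≠ y ∨ ((x:Int)-1 < (i:Int)) := by
        rcases eq_or_ne j y with h | h
        · subst h
          right
          rcases Nat.lt_or_ge i x with h' | h'
          · exfalso
            have h4 : (i+1)*m ≤ x*m := Nat.mul_le_mul_right m h'
            have h5 : (i+1)*m = i*m+m := by rw [Nat.add_mul]; omega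
            omega
          · omega
        · exact Or.inl h
      rw [markA_up (n+m+1) (pvSetCell g x y "o") y ((x:Int)-1) ↑n ↑m i j hcond,
        pvCell_setCell_ne g x y "o" i j hne_xy, hcell i j hi hj (by omega)]
      by_cases hOg2 : pvCell O i j ∈ pvGuards
      · rw [if_pos hOg2, if_pos hOg2]
      · rw [if_neg hOg2, if_neg hOg2]
        by_cases hck : covK O m (x*m+y) i j = true
        · rw [if_pos hck, if_pos (covK_mono _ _ _ _ _ _ (by omega) hck)]
        · have hck1 : ¬(covK O m (x*m+y+1) i j = true) := by
            intro hc1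
            rcases covK_succ O m x y i j hy hj hc1 with h | ⟨hi', hlt, hnb⟩ | ⟨hj', hlt, hnb⟩
            · exact hck h
            · have := (nbF_some _ _ _ _ hnb).1
              rw [show pvRow O x y = pvCell O x y from rfl, hcase] at this
              simp at this
            · have := (nbF_some _ _ _ _ hnb).1
              rw [show pvCol O y x = pvCell O x y from rfl, hcase] at this
              simp at this
          rw [if_neg hck, if_neg hck1]
    · -- "v"
      have hgxy : pvCell g x y = "v" := by rw [hw, hcase]
      have hlen1 : (pvSetCell g x y "o").length = g.length := pvSetCell_length g _ _ _
      have hrow1 : ∀ i', ((pvSetCell g x y "o").getD i' []).length = (g.getD i' []).length :=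
        fun i' => pvSetCell_row_length g _ _ _ i'
      have hchar := markA_down (n+m+1) (pvSetCell g x y "o") (x+1) y n m hy
        (by omega) (fun s hs => by rw [hrow1 s]; exact hgrows s hs) (by omega)
      rw [show ((x+1 : Nat) : Int) = (x:Int)+1 by push_cast; ring] at hchar
      have hS : stopF (pvCol (pvSetCell g x y "o") y) n (x+1) = stopF (pvCol O y) n (x+1) := by
        apply stopF_congr_mem
        intro s hs1 hs2
        rw [show pvCol (pvSetCell g x y "o") y s = pvCell (pvSetCell g x y "o") s y from rfl,
          pvCell_setCell_ne g x y "o" s y (by rintro ⟨rfl, _⟩; omega),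
          show pvCol O y s = pvCell O s y from rfl]
        exact memg_iff O g n m (x*m+y) ⟨hl, hr, hcell⟩ s y hs2 hy
          (by have h4 : x*m ≤ s*m := Nat.mul_le_mul_right m (by omega); omega)
      rw [hS] at hchar
      have hc2 : pvCell (markA (n+m+1) (pvSetCell g x y "o") ((x:Int)+1) ↑y ↑n ↑m "down") x y
          = "o" := by
        rw [hchar x y, if_neg (by omega : ¬(y = y ∧ x+1 ≤ x ∧ x < stopF (pvCol O y) n (x+1)))]
        exact pvCell_setCell_self g x y "o" hxg (by omega)
      have hstep : pvStepA ↑n ↑m (g, start) ↑x ↑y =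
          (markA (n+m+1) (pvSetCell g x y "o") ((x:Int)+1) ↑y ↑n ↑m "down", start) := by
        simp only [pvStepA, Int.toNat_natCast, hgxy, reduceIte, String.reduceEq]
        simp only [hc2, reduceIte, String.reduceEq]
      rw [hstep]
      have hml := markA_length (n+m+1) (pvSetCell g x y "o") ((x:Int)+1) ↑y ↑n ↑m "down"
      refine ⟨⟨hml.1.trans (hlen1.trans hl), fun i => ((hml.2 i).trans (hrow1 i)).trans (hr i), ?_⟩,
        by rw [if_neg hvisf]⟩
      intro i j hi hj hord
      have hne_xy : ¬(i = x ∧ j = y) := by rintro ⟨rfl, rfl⟩; omega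
      by_cases hray : j = y ∧ x+1 ≤ i ∧ i < stopF (pvCol O y) n (x+1)
      · rw [hchar i j, if_pos hray]
        obtain ⟨hj', hi1, hi2⟩ := hray
        have hOnb : pvCell O i j ∉ pvGuards := by
          intro hgs
          exact stopF_nonguard (pvCol O y) n (x+1) i hi1 hi2 (by
            rw [show pvCol O y i = pvCell O i y from rfl, ← hj']
            exact hgs)
        have hnb : nbF (pvCol O y) i = some (x, "v") := by
          have hbet : ∀ t, x < t → t < i → pvCol O y t ∉ pvGuards := fun t ht1 ht2 =>
            stopF_nonguard (pvCol O y) n (x+1) t (by omega) (by omega)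
          have := nbF_eq_some (pvCol O y) i x (by omega)
            (by rw [show pvCol O y x = pvCell O x y from rfl, hcase]; decide) hbet
          rw [show pvCol O y x = pvCell O x y from rfl, hcase] at this
          exact this
        have hcov : covK O m (x*m+y+1) i j = true := by
          unfold covK
          rw [hj', hnb]
          simp
        rw [if_neg hOnb, if_pos hcov]
      · rw [hchar i j, if_neg hray, pvCell_setCell_ne g x y "o" i j hne_xy,
          hcell i j hi hj (by omega)]
        by_cases hOg2 : pvCell O i j ∈ pvGuards
        · rw [if_pos hOg2, if_pos hOg2]
        · rw [if_neg hOg2, if_neg hOg2]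
          by_cases hck : covK O m (x*m+y) i j = true
          · rw [if_pos hck, if_pos (covK_mono _ _ _ _ _ _ (by omega) hck)]
          · have hck1 : ¬(covK O m (x*m+y+1) i j = true) := by
              intro hc1
              rcases covK_succ O m x y i j hy hj hc1 with h | ⟨hi', hlt, hnb⟩ | ⟨hj', hlt, hnb⟩
              · exact hck h
              · have := (nbF_some _ _ _ _ hnb).1
                rw [show pvRow O x y = pvCell O x y from rfl, hcase] at this
                simp at this
              · have hbet := (nbF_some _ _ _ _ hnb).2.2.2
                have hiS : i < stopF (pvCol O y) n (x+1) := by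
                  apply lt_stopF (pvCol O y) n (x+1) i (by omega) hi
                  intro s hs1 hs2
                  rcases Nat.lt_or_ge s i with h' | h'
                  · exact hbet s (by omega) h'
                  · have hsi : s = i := by omega
                    subst hsi
                    intro hgs
                    apply hOg2
                    rw [show pvCol O y s = pvCell O s y from rfl, ← hj'] at hgs
                    exact hgs
                exact hray ⟨hj', by omega, hiS⟩
            rw [if_neg hck, if_neg hck1]
  · -- not a guard: grid unchanged, only `start` may move
    rw [if_neg hOg] at hw
    have hnotg : pvCell g x y ∉ pvGuards := by
      rw [hw]
      split
      · decide
      · exact hOg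
    have hne : ∀ c : String, c ∈ pvGuards → pvCell g x y ≠ c := fun c hc h => by
      rw [h] at hnotg; exact hnotg hc
    have hstep : pvStepA ↑n ↑m (g, start) ↑x ↑y =
        (g, if pvCell g x y = "A" then [(x:Int), (y:Int)] else start) := by
      simp only [pvStepA, Int.toNat_natCast]
      rw [if_neg (hne ">" (by decide)), if_neg (hne "<" (by decide)),
        if_neg (hne "v" (by decide)), if_neg (hne "^" (by decide))]
    rw [hstep]
    constructor
    · refine ⟨hl, hr, ?_⟩
      intro i j hi hj hord
      rw [hcell i j hi hj (by omega)]
      by_cases hOg2 : pvCell O i j ∈ pvGuards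
      · rw [if_pos hOg2, if_pos hOg2]
      · rw [if_neg hOg2, if_neg hOg2]
        by_cases hck : covK O m (x*m+y) i j = true
        · rw [if_pos hck, if_pos (covK_mono _ _ _ _ _ _ (by omega) hck)]
        · have hck1 : ¬(covK O m (x*m+y+1) i j = true) := by
            intro hc1
            rcases covK_succ O m x y i j hy hj hc1 with h | ⟨hi', hlt, hnb⟩ | ⟨hj', hlt, hnb⟩
            · exact hck h
            · have := (nbF_some _ _ _ _ hnb).1
              have hgm : pvRow O x y ∈ pvGuards := by rw [this]; decide
              exact hOg hgm
            · have := (nbF_some _ _ _ _ hnb).1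
              have hgm : pvCol O y x ∈ pvGuards := by rw [this]; decide
              exact hOg hgm
          rw [if_neg hck, if_neg hck1]
    · rw [covK_self O m x y hm] at hw
      by_cases hcv : covF O x y = true
      · rw [if_pos hcv] at hw
        rw [if_neg (by rw [hw]; decide), if_neg (fun hv => by
          have := (vis_iff O x y).mp hv
          rw [hcv] at this
          simp at this)]
      · rw [if_neg hcv] at hw
        by_cases hA : pvCell O x y = "A"
        · rw [if_pos (by rw [hw]; exact hA),
            if_pos ((vis_iff O x y).mpr ⟨hA, by simpa using hcv⟩)]
        · rw [if_neg (by rw [hw]; exact hA), if_neg (fun hv => hA ((vis_iff O x y).mp hv).1)]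

-- ---- the fold lemmas (A's simulation fold = pure pvVis fold) ----
lemma pvCols (O : List (List String)) (n m x : Nat)
    (hlen : n ≤ O.length) (hrows : ∀ i, i < n → m ≤ (O.getD i []).length) (hx : x < n) :
    ∀ cnt y0, y0 + cnt = m → ∀ (g : List (List String)) (start : List Int),
    pvInv O g n m (x*m+y0) →
    pvInv O ((PySem.List.pyRange ↑y0 ↑m 1).foldl
        (fun st y => pvStepA ↑n ↑m st ↑x y) (g, start)).1 n m (x*m+m) ∧
    ((PySem.List.pyRange ↑y0 ↑m 1).foldl
        (fun st y => pvStepA ↑n ↑m st ↑x y) (g, start)).2 =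
      (PySem.List.pyRange ↑y0 ↑m 1).foldl
        (fun start y => if pvVis O (Int.toNat ↑x) y.toNat then [↑x, y] else start) start := by
  intro cnt
  induction cnt with
  | zero =>
    intro y0 h g start hInv
    have hy0 : y0 = m := by omega
    subst hy0
    rw [PySem.List.pyRange_one_eq_nil (le_refl _)]
    exact ⟨hInv, rfl⟩
  | succ cnt ih =>
    intro y0 h g start hInv
    have hy0 : y0 < m := by omega
    rw [PySem.List.pyRange_one_cons (by omega : (↑y0 : Int) < ↑m)]
    simp only [List.foldl_cons]
    have hstep := pvStep_spec O g n m x y0 hlen hrows hx hy0 hInv start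
    have harith : (↑y0 : Int) + 1 = ((y0+1 : Nat) : Int) := by push_cast; ring
    rw [harith]
    obtain ⟨G, S, hGS⟩ : ∃ G S, pvStepA ↑n ↑m (g, start) ↑x ↑y0 = (G, S) := ⟨_, _, rfl⟩
    rw [hGS]
    rw [hGS] at hstep
    have hih := ih (y0+1) (by omega) G S
      (by rw [show x*m+(y0+1) = x*m+y0+1 by omega]; exact hstep.1)
    refine ⟨hih.1, ?_⟩
    rw [hih.2, show S = (if pvVis O x y0 then [(x : Int), (y0 : Int)] else start) from hstep.2]
    congr 1

lemma pvRows (O : List (List String)) (n m : Nat)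
    (hlen : n ≤ O.length) (hrows : ∀ i, i < n → m ≤ (O.getD i []).length) :
    ∀ cnt x0, x0 + cnt = n → ∀ (g : List (List String)) (start : List Int),
    pvInv O g n m (x0*m) →
    ((PySem.List.pyRange ↑x0 ↑n 1).foldl
        (fun st x => (PySem.List.pyRange 0 ↑m 1).foldl (fun st y => pvStepA ↑n ↑m st x y) st)
        (g, start)).2 =
      (PySem.List.pyRange ↑x0 ↑n 1).foldl
        (fun start x => (PySem.List.pyRange 0 ↑m 1).foldl
          (fun start y => if pvVis O x.toNat y.toNat then [x, y] else start) start) start := by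
  intro cnt
  induction cnt with
  | zero =>
    intro x0 h g start hInv
    have hx0 : x0 = n := by omega
    subst hx0
    rw [PySem.List.pyRange_one_eq_nil (le_refl _)]
    rfl
  | succ cnt ih =>
    intro x0 h g start hInv
    have hx0 : x0 < n := by omega
    rw [PySem.List.pyRange_one_cons (by omega : (↑x0 : Int) < ↑n)]
    simp only [List.foldl_cons]
    have hcols := pvCols O n m x0 hlen hrows hx0 m 0 (by omega) g start
      (by rw [show x0*m+0 = x0*m by omega]; exact hInv)
    rw [Nat.cast_zero] at hcols
    have harith : (↑x0 : Int) + 1 = ((x0+1 : Nat) : Int) := by push_cast; ring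
    rw [harith]
    obtain ⟨G, S, hGS⟩ : ∃ G S,
        (PySem.List.pyRange 0 ↑m 1).foldl (fun st y => pvStepA ↑n ↑m st ↑x0 y) (g, start)
          = (G, S) := ⟨_, _, rfl⟩
    rw [hGS]
    rw [hGS] at hcols
    obtain ⟨hInv2, heq⟩ := hcols
    have hih := ih (x0+1) (by omega) G S
      (by rw [show (x0+1)*m = x0*m+m by ring]; exact hInv2)
    rw [hih, show S = _ from heq]

lemma pvInv_zero (O : List (List String)) (n m : Nat) : pvInv O O n m (0 * m) := by
  refine ⟨rfl, fun i => rfl, fun x y hx hy hk => ?_⟩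
  have hcov : covK O m (0 * m) x y = false := by
    unfold covK
    rcases hn : nbF (pvRow O x) y with _ | ⟨p, c⟩ <;>
      rcases hn2 : nbF (pvCol O y) x with _ | ⟨p2, c2⟩ <;> simp
  rw [hcov]
  split <;> rfl

-- ---- last-hit characterization of "last wins" folds ----
def lastHit (p : Nat → Bool) : Nat → Option Nat
  | 0 => none
  | m+1 => if p m then some m else lastHit p m

def lastHit2 (p : Nat → Nat → Bool) (m : Nat) : Nat → Option (Nat × Nat)
  | 0 => none
  | n+1 => match lastHit (p n) m with
    | some y => some (n, y)
    | none => lastHit2 p m n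

lemma lastHit_none (p : Nat → Bool) (m : Nat) :
    lastHit p m = none ↔ ∀ y, y < m → p y = false := by
  induction m with
  | zero => simp [lastHit]
  | succ m ih =>
    simp only [lastHit]
    by_cases hp : p m
    · rw [if_pos hp]
      simp only [reduceCtorEq, false_iff]
      intro h
      rw [h m (by omega)] at hp
      exact Bool.false_ne_true hp
    · rw [if_neg hp, ih]
      constructor
      · intro h y hy
        rcases Nat.lt_or_ge y m with h' | h'
        · exact h y h'
        · have : y = m := by omega
          subst this
          simpa using hp
      · intro h y hy
        exact h y (by omega)

lemma lastHit_some (p : Nat → Bool) (m y : Nat) (h : lastHit p m = some y) :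
    y < m ∧ p y = true ∧ ∀ y', y < y' → y' < m → p y' = false := by
  induction m with
  | zero => simp [lastHit] at h
  | succ m ih =>
    simp only [lastHit] at h
    by_cases hp : p m
    · rw [if_pos hp] at h
      obtain rfl : m = y := by simpa using h
      exact ⟨by omega, hp, fun y' h1 h2 => by omega⟩
    · rw [if_neg hp] at h
      obtain ⟨h1, h2, h3⟩ := ih h
      refine ⟨by omega, h2, fun y' hy1 hy2 => ?_⟩
      rcases Nat.lt_or_ge y' m with h' | h'
      · exact h3 y' hy1 h'
      · have : y' = m := by omega
        subst this
        simpa using hp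

lemma lastHit_eq_some (p : Nat → Bool) (m y : Nat) (h1 : y < m) (h2 : p y = true)
    (h3 : ∀ y', y < y' → y' < m → p y' = false) : lastHit p m = some y := by
  induction m with
  | zero => omega
  | succ m ih =>
    simp only [lastHit]
    rcases Nat.lt_or_ge y m with h' | h'
    · rw [if_neg (by rw [h3 m (by omega) (by omega)]; simp)]
      exact ih h' fun y' ha hb => h3 y' ha (by omega)
    · obtain rfl : y = m := by omega
      rw [if_pos h2]

lemma lastHit2_none (p : Nat → Nat → Bool) (m n : Nat) :
    lastHit2 p m n = none ↔ ∀ x, x < n → ∀ y, y < m → p x y = false := by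
  induction n with
  | zero => simp [lastHit2]
  | succ n ih =>
    simp only [lastHit2]
    rcases hrow : lastHit (p n) m with _ | y
    · rw [ih]
      have hall := (lastHit_none (p n) m).mp hrow
      constructor
      · intro h x hx y hy
        rcases Nat.lt_or_ge x n with h' | h'
        · exact h x h' y hy
        · obtain rfl : x = n := by omega
          exact hall y hy
      · intro h x hx y hy
        exact h x (by omega) y hy
    · simp only [reduceCtorEq, false_iff]
      intro h
      obtain ⟨hy, hp, _⟩ := lastHit_some (p n) m y hrow
      rw [h n (by omega) y hy] at hp
      exact Bool.false_ne_true hp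

lemma lastHit2_some (p : Nat → Nat → Bool) (m n x y : Nat)
    (h : lastHit2 p m n = some (x, y)) :
    x < n ∧ y < m ∧ p x y = true ∧
    (∀ y', y < y' → y' < m → p x y' = false) ∧
    (∀ x', x < x' → x' < n → ∀ y', y' < m → p x' y' = false) := by
  induction n with
  | zero => simp [lastHit2] at h
  | succ n ih =>
    simp only [lastHit2] at h
    rcases hrow : lastHit (p n) m with _ | z
    · rw [hrow] at h
      obtain ⟨h1, h2, h3, h4, h5⟩ := ih h
      have hall := (lastHit_none (p n) m).mp hrow
      refine ⟨by omega, h2, h3, h4, fun x' ha hb y' hy' => ?_⟩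
      rcases Nat.lt_or_ge x' n with h' | h'
      · exact h5 x' ha h' y' hy'
      · obtain rfl : x' = n := by omega
        exact hall y' hy'
    · rw [hrow] at h
      have hxz : n = x ∧ z = y := by simpa using h
      obtain ⟨h1, h2, h3⟩ := lastHit_some (p n) m z hrow
      rw [← hxz.1, ← hxz.2]
      exact ⟨by omega, h1, h2, h3, fun x' ha hb y' hy' => by omega⟩

lemma lastHit2_eq_some (p : Nat → Nat → Bool) (m n x y : Nat)
    (h1 : x < n) (h2 : y < m) (h3 : p x y = true)
    (h4 : ∀ y', y < y' → y' < m → p x y' = false)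
    (h5 : ∀ x', x < x' → x' < n → ∀ y', y' < m → p x' y' = false) :
    lastHit2 p m n = some (x, y) := by
  induction n with
  | zero => omega
  | succ n ih =>
    simp only [lastHit2]
    rcases Nat.lt_or_ge x n with h' | h'
    · rw [(lastHit_none (p n) m).mpr (fun y' hy' => h5 n h' (by omega) y' hy')]
      exact ih h' fun x' ha hb => h5 x' ha (by omega)
    · obtain rfl : x = n := by omega
      rw [lastHit_eq_some (p x) m y h2 h3 h4]

-- the inner "last wins" fold over one row
lemma rowFold (p : Nat → Bool) (x : Int) (m : Nat) (acc : List Int) :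
    (PySem.List.pyRange 0 ↑m 1).foldl (fun s y => if p y.toNat then [x, y] else s) acc
    = match lastHit p m with | some y => [x, (y : Int)] | none => acc := by
  induction m with
  | zero =>
    rw [show ((0:Nat):Int) = 0 by norm_num, PySem.List.pyRange_one_eq_nil (by omega)]
    simp [lastHit]
  | succ m ih =>
    rw [show ((m+1:Nat):Int) = (↑m:Int)+1 by push_cast; ring,
      PySem.List.pyRange_one_succ_right (by omega : (0:Int) ≤ ↑m)]
    rw [List.foldl_append]
    simp only [List.foldl_cons, List.foldl_nil, lastHit, Int.toNat_natCast]
    by_cases hp : p m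
    · rw [if_pos hp, if_pos hp]
    · rw [if_neg hp, if_neg hp, ih]

-- the full "last wins" grid fold
lemma gridFold (p : Nat → Nat → Bool) (m : Nat) : ∀ (n : Nat) (acc : List Int),
    (PySem.List.pyRange 0 ↑n 1).foldl
      (fun s x => (PySem.List.pyRange 0 ↑m 1).foldl
        (fun s y => if p x.toNat y.toNat then [x, y] else s) s) acc
    = match lastHit2 p m n with | some (x, y) => [(x : Int), (y : Int)] | none => acc := by
  intro n
  induction n with
  | zero =>
    intro acc
    rw [show ((0:Nat):Int) = 0 by norm_num]
    rw [show PySem.List.pyRange (0:Int) 0 1 = [] from PySem.List.pyRange_one_eq_nil (by omega)]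
    simp [lastHit2]
  | succ n ih =>
    intro acc
    rw [show ((n+1:Nat):Int) = (↑n:Int)+1 by push_cast; ring,
      PySem.List.pyRange_one_succ_right (by omega : (0:Int) ≤ ↑n)]
    rw [List.foldl_append]
    simp only [List.foldl_cons, List.foldl_nil, lastHit2]
    rw [ih acc]
    have hrow := rowFold (p (↑n : Int).toNat) ↑n m
      (match lastHit2 p m n with | some (x, y) => [(x : Int), (y : Int)] | none => acc)
    simp only [Int.toNat_natCast] at hrow ⊢
    rw [hrow]
    rcases lastHit (p n) m with _ | y <;> rcases lastHit2 p m n with _ | ⟨a, b⟩ <;> rfl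

-- ---- bridges between B's port helpers and the nearest-blocker scans ----
lemma nbF_map (f : Nat → String) (j : Nat) :
    nbF f j = (pvScanNeg f j).map (fun i => (i, f i)) := by
  induction j with
  | zero => simp [nbF, pvScanNeg]
  | succ j ih =>
    simp only [nbF, pvScanNeg]
    by_cases hg : f j ∈ pvGuards
    · rw [if_pos hg, if_pos hg]; rfl
    · rw [if_neg hg, if_neg hg]; exact ih

lemma nbGGo_map (f : Nat → String) (k : Nat) : ∀ t,
    nbGGo f k t = (pvScanPosGo f k t).map (fun i => (i, f i)) := by
  induction k with
  | zero => intro t; rfl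
  | succ k ih =>
    intro t
    simp only [nbGGo, pvScanPosGo]
    by_cases hg : f t ∈ pvGuards
    · rw [if_pos hg, if_pos hg]; rfl
    · rw [if_neg hg, if_neg hg]; exact ih (t+1)

lemma nbG_map (f : Nat → String) (b t : Nat) :
    nbG f b t = (pvScanPos f b t).map (fun i => (i, f i)) := by
  unfold nbG pvScanPos
  exact nbGGo_map f (b - t) t

-- Source B's per-cell test = "unwatched from left/above" AND "unwatched from right/below"
lemma vis4_eq (g : List (List String)) (n m x y : Nat) :
    ((g.getD x []).getD y "" == "A" && !pvWatched g x y n m)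
    = (pvVis g x y && !pvSeenRB g n m x y) := by
  unfold pvWatched pvVis pvSeenRB pvCell
  rw [show (fun j => (g.getD x []).getD j "") = pvRow g x from rfl,
    show (fun i => (g.getD i []).getD y "") = pvCol g y from rfl,
    nbF_map, nbG_map, nbF_map, nbG_map]
  rcases pvScanNeg (pvRow g x) y with _ | i1 <;>
    rcases pvScanPos (pvRow g x) m (y+1) with _ | i2 <;>
      rcases pvScanNeg (pvCol g y) x with _ | i3 <;>
        rcases pvScanPos (pvCol g y) n (x+1) with _ | i4 <;>
          · apply Bool.coe_iff_coe.mp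
            simp [pvRow, pvCol]
            all_goals tauto

-- B's port as a pure "last wins" fold over its per-cell test
lemma alt_eq_fold (graph : List (List String)) (n m : Nat) :
    check_guard_alt graph ↑n ↑m
    = match lastHit2 (fun a b => pvVis graph a b && !pvSeenRB graph n m a b) m n with
      | some (x, y) => [(x : Int), (y : Int)] | none => [-1, -1] := by
  have hc : (fun a b => ((graph.getD a []).getD b "" == "A" && !pvWatched graph a b n m))
      = (fun a b => pvVis graph a b && !pvSeenRB graph n m a b) := by
    funext a b
    exact vis4_eq graph n m a b
  have h := gridFold (fun a b => ((graph.getD a []).getD b "" == "A"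
      && !pvWatched graph a b n m)) m n [-1, -1]
  rw [hc] at h
  exact h

-- A's port as a pure "last wins" fold over pvVis
lemma a_eq_fold (graph : List (List String)) (n m : Nat)
    (hlen : n ≤ graph.length) (hrows : ∀ i, i < n → m ≤ (graph.getD i []).length) :
    check_guard graph ↑n ↑m
    = match lastHit2 (fun a b => pvVis graph a b) m n with
      | some (x, y) => [(x : Int), (y : Int)] | none => [-1, -1] := by
  unfold check_guard
  have h0 : ((0 : Nat) : Int) = (0 : Int) := by norm_num
  have hA := pvRows graph n m hlen hrows n 0 (by omega) graph [-1, -1]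
    (pvInv_zero graph n m)
  rw [h0] at hA
  rw [hA]
  exact gridFold (fun a b => pvVis graph a b) m n [-1, -1]


-- ---- bridges between the closed-form D_ conditions and the scans ----
lemma nbGGo_some (f : Nat → String) : ∀ (k t p : Nat) (c : String),
    nbGGo f k t = some (p, c) →
    f p = c ∧ t ≤ p ∧ p < t + k ∧ c ∈ pvGuards ∧ ∀ s, t ≤ s → s < p → f s ∉ pvGuards := by
  intro k
  induction k with
  | zero => intro t p c h; simp [nbGGo] at h
  | succ k ih =>
    intro t p c h
    simp only [nbGGo] at h
    by_cases hg : f t ∈ pvGuards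
    · rw [if_pos hg] at h
      obtain ⟨hp, hc⟩ := by simpa using h
      subst hp; subst hc
      exact ⟨rfl, le_refl _, by omega, hg, fun s h1 h2 => by omega⟩
    · rw [if_neg hg] at h
      obtain ⟨h1, h2, h3, h4, h5⟩ := ih (t+1) p c h
      refine ⟨h1, by omega, by omega, h4, fun s hs1 hs2 => ?_⟩
      rcases Nat.lt_or_ge s (t+1) with hs | hs
      · have : s = t := by omega
        subst this; exact hg
      · exact h5 s hs hs2

lemma nbGGo_eq_some (f : Nat → String) : ∀ (k t p : Nat),
    t ≤ p → p < t + k → f p ∈ pvGuards → (∀ s, t ≤ s → s < p → f s ∉ pvGuards) →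
    nbGGo f k t = some (p, f p) := by
  intro k
  induction k with
  | zero => intro t p h1 h2 h3 h4; omega
  | succ k ih =>
    intro t p h1 h2 h3 h4
    simp only [nbGGo]
    rcases Nat.eq_or_lt_of_le h1 with he | hl
    · subst he; rw [if_pos h3]
    · rw [if_neg (h4 t (le_refl t) hl)]
      exact ih (t+1) p (by omega) (by omega) h3 (fun s hs1 hs2 => h4 s (by omega) hs2)

lemma nbG_some (f : Nat → String) (b t p : Nat) (c : String) (h : nbG f b t = some (p, c)) :
    f p = c ∧ t ≤ p ∧ p < b ∧ c ∈ pvGuards ∧ ∀ s, t ≤ s → s < p → f s ∉ pvGuards := by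
  unfold nbG at h
  obtain ⟨h1, h2, h3, h4, h5⟩ := nbGGo_some f (b - t) t p c h
  exact ⟨h1, h2, by omega, h4, h5⟩

lemma nbG_eq_some (f : Nat → String) (b t p : Nat) (h1 : t ≤ p) (h2 : p < b)
    (h3 : f p ∈ pvGuards) (h4 : ∀ s, t ≤ s → s < p → f s ∉ pvGuards) :
    nbG f b t = some (p, f p) := by
  unfold nbG
  exact nbGGo_eq_some f (b - t) t p h1 (by omega) h3 h4

lemma nearLo_iff (f : Nat → String) (b : Nat) (c : String) (hc : c ∈ pvGuards) :
    pvNearLo f b c ↔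
    (match nbF f b with | some (_, c') => c' == c | none => false) = true := by
  constructor
  · rintro ⟨j, hj, hcell, hblk⟩
    have hg : f j ∈ pvGuards := by rw [hcell]; exact hc
    have hnb := nbF_eq_some f b j hj hg (fun t ht1 ht2 => hblk t ht2 ht1)
    rw [hnb]
    show (f j == c) = true
    rw [hcell]; simp
  · intro h
    rcases hn : nbF f b with _ | ⟨p, c'⟩
    · rw [hn] at h; simp at h
    · rw [hn] at h
      have hc' : c' = c := by simpa using h
      obtain ⟨hfp, hpb, hcg, hbet⟩ := nbF_some _ _ _ _ hn
      exact ⟨p, hpb, by rw [hfp, hc'], fun k hk hlt => hbet k hlt hk⟩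

lemma nearHi_iff (f : Nat → String) (a b : Nat) (c : String) (hc : c ∈ pvGuards) :
    pvNearHi f a b c ↔
    (match nbG f b a with | some (_, c') => c' == c | none => false) = true := by
  constructor
  · rintro ⟨j, hj, haj, hcell, hblk⟩
    have hg : f j ∈ pvGuards := by rw [hcell]; exact hc
    have hnb := nbG_eq_some f b a j haj hj hg (fun s hs1 hs2 => hblk s hs2 hs1)
    rw [hnb]
    show (f j == c) = true
    rw [hcell]; simp
  · intro h
    rcases hn : nbG f b a with _ | ⟨p, c'⟩
    · rw [hn] at h; simp at h
    · rw [hn] at h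
      have hc' : c' = c := by simpa using h
      obtain ⟨hfp, hp1, hp2, hcg, hbet⟩ := nbG_some _ _ _ _ _ hn
      exact ⟨p, hp2, hp1, by rw [hfp, hc'], fun k hk hak => hbet k hak hk⟩

lemma visP_iff (g : List (List String)) (x y : Nat) :
    pvVisP g x y ↔ pvVis g x y = true := by
  unfold pvVisP
  rw [show (fun j => pvCell g x j) = pvRow g x from rfl,
    show (fun i => pvCell g i y) = pvCol g y from rfl,
    nearLo_iff _ _ _ (by decide), nearLo_iff _ _ _ (by decide)]
  unfold pvVis
  simp only [Bool.and_eq_true, beq_iff_eq, Bool.not_eq_true']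
  constructor
  · rintro ⟨hA, hL, hU⟩
    exact ⟨⟨hA, by cases hb : (match nbF (pvRow g x) y with | some (_, c) => c == ">" | none => false)
        <;> simp_all⟩,
      by cases hb : (match nbF (pvCol g y) x with | some (_, c) => c == "v" | none => false)
        <;> simp_all⟩
  · rintro ⟨⟨hA, hL⟩, hU⟩
    exact ⟨hA, by rw [hL]; simp, by rw [hU]; simp⟩

lemma D_iff (graph : List (List String)) (N M : Int)
    (hlen : N ≤ (graph.length : Int))
    (hrows : ∀ i, i < N.toNat → M.toNat ≤ (graph.getD i []).length) :
    D_check_guard graph N M ↔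
      (∃ x < N.toNat, ∃ y < M.toNat, pvVisP graph x y ∧
        pvSeenRBP graph N.toNat M.toNat x y ∧
        ∀ x' < N.toNat, ∀ y' < M.toNat, x < x' ∨ (x = x' ∧ y < y') →
          ¬ pvVisP graph x' y') := by
  unfold D_check_guard
  have e1 : min N.toNat graph.length = N.toNat := by omega
  have e2 : ∀ i, i < N.toNat → min M.toNat (graph.getD i []).length = M.toNat :=
    fun i hi => by have := hrows i hi; omega
  rw [e1]
  constructor
  · rintro ⟨x, hx, y, hy, h1, h2, h3⟩
    rw [e2 x hx] at hy
    exact ⟨x, hx, y, hy, h1, h2,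
      fun x' hx' y' hy' ho => h3 x' hx' y' (by rw [e2 x' hx']; exact hy') ho⟩
  · rintro ⟨x, hx, y, hy, h1, h2, h3⟩
    exact ⟨x, hx, y, by rw [e2 x hx]; exact hy, h1, h2,
      fun x' hx' y' hy' ho => h3 x' hx' y' (by rw [e2 x' hx'] at hy'; exact hy') ho⟩

lemma visP_false (g : List (List String)) (x y : Nat) (h : ¬ pvVisP g x y) :
    pvVis g x y = false := by
  cases hv : pvVis g x y
  · rfl
  · exact absurd ((visP_iff g x y).mpr hv) h

lemma seenP_iff (g : List (List String)) (n m x y : Nat)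
    (h1 : n ≤ g.length) (h2 : m ≤ (g.getD x []).length) :
    pvSeenRBP g n m x y ↔ pvSeenRB g n m x y = true := by
  unfold pvSeenRBP pvSeenRB
  rw [show min m (g.getD x []).length = m by omega, show min n g.length = n by omega,
    show (fun j => pvCell g x j) = pvRow g x from rfl,
    show (fun i => pvCell g i y) = pvCol g y from rfl,
    nearHi_iff _ _ _ _ (by decide), nearHi_iff _ _ _ _ (by decide)]
  simp [Bool.or_eq_true]

theorem check_guard_spec : Claim_unchanged_check_guard := by
  intro graph N M _hDom hPre hD
  by_cases hN : 0 < N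
  · by_cases hM : 0 < M
    · obtain ⟨hlen, hrows⟩ := hPre hN hM
      set n := N.toNat with hn
      set m := M.toNat with hm
      have hNe : N = ((n : Nat) : Int) := by omega
      have hMe : M = ((m : Nat) : Int) := by omega
      rw [hNe, hMe]
      have hrows' : ∀ i, i < n → m ≤ (graph.getD i []).length := by
        intro i hi
        have hmem : graph.getD i [] ∈ graph.take n := by
          rw [List.getD_eq_getElem _ _ (by omega : i < graph.length)]
          have hlt : i < (graph.take n).length := by simp; omega
          have hmem0 := List.getElem_mem hlt
          rw [List.getElem_take] at hmem0
          exact hmem0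
        have := hrows _ hmem
        omega
      have hlen' : n ≤ graph.length := by omega
      rw [a_eq_fold graph n m hlen' hrows', alt_eq_fold graph n m]
      have hsub : ∀ a b, (pvVis graph a b && !pvSeenRB graph n m a b) = true →
          pvVis graph a b = true := by
        intro a b h
        exact (Bool.and_eq_true _ _ |>.mp h).1
      rcases h2 : lastHit2 (fun a b => pvVis graph a b) m n with _ | ⟨x, y⟩
      · have hall := (lastHit2_none _ m n).mp h2
        have hq : lastHit2 (fun a b => pvVis graph a b && !pvSeenRB graph n m a b) m n
            = none :=
          (lastHit2_none _ m n).mpr (fun a ha b hb => by rw [hall a ha b hb]; rfl)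
        rw [hq]
      · obtain ⟨hx, hy, hvis, hmy, hmx⟩ := lastHit2_some _ m n x y h2
        have hseen : pvSeenRB graph n m x y = false := by
          by_contra hc
          have hc' : pvSeenRB graph n m x y = true := by
            cases hs : pvSeenRB graph n m x y
            · exact absurd hs hc
            · rfl
          refine hD ((D_iff graph N M hlen hrows').mpr ⟨x, hx, y, hy,
            (visP_iff graph x y).mpr hvis,
            (seenP_iff graph n m x y hlen' (hrows' x hx)).mpr hc',
            fun x' hx' y' hy' hor hp => ?_⟩)
          have hvt := (visP_iff graph x' y').mp hp
          rcases hor with h | ⟨he, hlt⟩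
          · rw [hmx x' h hx' y' hy'] at hvt
            exact Bool.false_ne_true hvt
          · rw [← he] at hvt
            rw [hmy y' hlt hy'] at hvt
            exact Bool.false_ne_true hvt
        have hq : lastHit2 (fun a b => pvVis graph a b && !pvSeenRB graph n m a b) m n
            = some (x, y) :=
          lastHit2_eq_some _ m n x y hx hy
            (by rw [hvis, hseen]; rfl)
            (fun y' h1 h2' => by rw [hmy y' h1 h2']; rfl)
            (fun x' h1 h2' y' hy' => by rw [hmx x' h1 h2' y' hy']; rfl)
        rw [hq]
    · -- M ≤ 0 : all inner ranges are empty, both folds leave the state unchanged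
      unfold check_guard check_guard_alt
      simp only [show PySem.List.pyRange 0 M 1 = [] from
        PySem.List.pyRange_one_eq_nil (by omega), List.foldl_nil]
      rw [List.foldl_fixed, List.foldl_fixed]
  · -- N ≤ 0 : both outer ranges are empty
    unfold check_guard check_guard_alt
    rw [show PySem.List.pyRange 0 N 1 = [] from PySem.List.pyRange_one_eq_nil (by omega)]
    simp

theorem check_guard_changed : Claim_changed_check_guard := by
  unfold Claim_changed_check_guard; decide

theorem check_guard_tight : Claim_exact_check_guard := by
  intro graph N M _hDom hPre hD
  have hD0 := hD
  unfold D_check_guard at hD0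
  obtain ⟨x0, hx0, y0, hy0, -⟩ := hD0
  have hN : 0 < N := by omega
  have hM : 0 < M := by omega
  obtain ⟨hlen, hrows⟩ := hPre hN hM
  have hrows0 : ∀ i, i < N.toNat → M.toNat ≤ (graph.getD i []).length := by
    intro i hi
    have hmem : graph.getD i [] ∈ graph.take N.toNat := by
      rw [List.getD_eq_getElem _ _ (by omega : i < graph.length)]
      have hlt : i < (graph.take N.toNat).length := by simp; omega
      have hmem0 := List.getElem_mem hlt
      rw [List.getElem_take] at hmem0
      exact hmem0
    have := hrows _ hmem
    omega
  obtain ⟨x, hx, y, hy, hvisP, hseenP, hmax⟩ := (D_iff graph N M hlen hrows0).mp hD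
  have hvis : pvVis graph x y = true := (visP_iff graph x y).mp hvisP
  have hseen : pvSeenRB graph N.toNat M.toNat x y = true :=
    (seenP_iff graph N.toNat M.toNat x y (by omega) (hrows0 x hx)).mp hseenP
  have hmy : ∀ y', y < y' → y' < M.toNat → pvVis graph x y' = false :=
    fun y' h1 h2 => visP_false graph x y' (hmax x hx y' h2 (Or.inr ⟨rfl, h1⟩))
  have hmx : ∀ x', x < x' → x' < N.toNat → ∀ y', y' < M.toNat → pvVis graph x' y' = false :=
    fun x' h1 h2 y' h3 => visP_false graph x' y' (hmax x' h2 y' h3 (Or.inl h1))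
  set n := N.toNat with hn
  set m := M.toNat with hm
  have hNe : N = ((n : Nat) : Int) := by omega
  have hMe : M = ((m : Nat) : Int) := by omega
  rw [hNe, hMe]
  have hrows' : ∀ i, i < n → m ≤ (graph.getD i []).length := by
    intro i hi
    have hmem : graph.getD i [] ∈ graph.take n := by
      rw [List.getD_eq_getElem _ _ (by omega : i < graph.length)]
      have hlt : i < (graph.take n).length := by simp; omega
      have hmem0 := List.getElem_mem hlt
      rw [List.getElem_take] at hmem0
      exact hmem0
    have := hrows _ hmem
    omega
  have hlen' : n ≤ graph.length := by omega
  rw [a_eq_fold graph n m hlen' hrows', alt_eq_fold graph n m]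
  rw [lastHit2_eq_some _ m n x y hx hy hvis hmy hmx]
  rcases h4 : lastHit2 (fun a b => pvVis graph a b && !pvSeenRB graph n m a b) m n
      with _ | ⟨x', y'⟩
  · intro hc
    have : ((x : Nat) : Int) = -1 := by
      have := List.head_eq_of_cons_eq hc
      exact this
    omega
  · obtain ⟨hx', hy', hq, _, _⟩ := lastHit2_some _ m n x' y' h4
    intro hc
    obtain ⟨hxe, hye⟩ : ((x : Nat) : Int) = ((x' : Nat) : Int) ∧
        ((y : Nat) : Int) = ((y' : Nat) : Int) := by
      refine ⟨List.head_eq_of_cons_eq hc, ?_⟩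
      have := List.tail_eq_of_cons_eq hc
      exact List.head_eq_of_cons_eq this
    have hxx : x = x' := by omega
    have hyy : y = y' := by omega
    subst hxx; subst hyy
    rw [Bool.and_eq_true] at hq
    rw [hseen] at hq
    simpa using hq.2
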